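-- pv_equiv track=rewrite | github.com/elessarrr/ports_digital_twin | hk_port_digital_twin/src/scenarios/historical_extractor.py | _identify_peak_months
-- ===== SOURCE A (Python) =====
-- from typing import Dict, List, Optional, Tuple
--
-- def _identify_peak_months(monthly_patterns: Dict) -> List[int]:
--     """Identify peak months from seasonal patterns"""
--     if not monthly_patterns:
--         return [6, 7, 8, 9, 10, 11]  # Default peak months
--
--     # Find months with highest total TEU values
--     month_values = []
--     for month in range(1, 13):
--         total_teu = monthly_patterns.get(month, {}).get('total_teu', 0)
--         month_values.append((month, total_teu))
--
--     # Sort by TEU values and take top 6 months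
--     month_values.sort(key=lambda x: x[1], reverse=True)
--     peak_months = [month for month, _ in month_values[:6]]
--
--     return sorted(peak_months)
-- ===== SOURCE B (Python) =====
-- def _identify_peak_months(monthly_patterns):
--     """Identify peak months from seasonal patterns (ranking pass instead of sort-and-slice)."""
--     if not monthly_patterns:
--         return [6, 7, 8, 9, 10, 11]  # Default peak months
--
--     teu = [monthly_patterns.get(m, {}).get('total_teu', 0) for m in range(1, 13)]
--
--     peaks = []
--     for m in range(1, 13):
--         t = teu[m - 1]
--         # rank = number of months that strictly outrank m (higher TEU, or equal TEU and smaller month)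
--         rank = sum(1 for m2 in range(1, 13)
--                    if teu[m2 - 1] > t or (teu[m2 - 1] == t and m2 < m))
--         if rank < 6:
--             peaks.append(m)
--     return peaks
-- ===== Notes on version B (the rewrite author's own statement) =====
-- stated objective: alternative
-- what changed: Replaces the stable reverse sort plus take-6 slice plus final sort with a single ranking pass: a month is a peak iff fewer than 6 months strictly outrank it (higher TEU, or equal TEU with smaller month number), collected in ascending month order directly.
import Mathlib
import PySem

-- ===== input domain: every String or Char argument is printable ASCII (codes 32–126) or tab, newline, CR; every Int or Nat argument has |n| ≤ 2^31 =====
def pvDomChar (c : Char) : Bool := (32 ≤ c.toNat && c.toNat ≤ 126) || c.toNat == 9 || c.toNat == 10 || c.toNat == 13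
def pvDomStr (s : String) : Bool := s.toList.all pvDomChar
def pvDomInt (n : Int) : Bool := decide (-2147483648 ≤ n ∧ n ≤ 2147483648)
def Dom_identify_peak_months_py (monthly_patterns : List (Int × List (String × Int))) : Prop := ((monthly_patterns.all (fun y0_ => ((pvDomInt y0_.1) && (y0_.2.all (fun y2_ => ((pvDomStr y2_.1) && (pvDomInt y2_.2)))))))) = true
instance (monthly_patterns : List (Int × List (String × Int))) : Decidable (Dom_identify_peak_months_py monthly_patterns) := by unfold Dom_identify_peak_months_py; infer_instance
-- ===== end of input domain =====

-- B replaces A's sort-then-slice-then-sort with a ranking pass (a month is a peak iff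
-- fewer than 6 months strictly outrank it); an alternative decomposition, not claimed faster.


-- shared lookup helper: monthly_patterns.get(month, {}).get('total_teu', 0)
def pvTeu (monthly_patterns : List (Int × List (String × Int))) (month : Int) : Int :=
  (PySem.Dict.ofList ((PySem.Dict.ofList monthly_patterns).getD month [])).getD "total_teu" 0

-- ===== PORT A =====
def identify_peak_months_py (monthly_patterns : List (Int × List (String × Int))) : List Int :=
  if monthly_patterns = [] then [6, 7, 8, 9, 10, 11]
  else
    -- month_values: (month, total_teu) for month in range(1, 13)
    let month_values := (PySem.List.pyRange 1 13).foldl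
      (fun acc month => acc ++ [(month, pvTeu monthly_patterns month)]) []
    -- month_values.sort(key=lambda x: x[1], reverse=True)
    let month_values := PySem.List.sorted month_values (fun x => x.2) true
    -- peak_months = [month for month, _ in month_values[:6]]
    let peak_months := (PySem.List.slice month_values none (some 6)).map (fun p => p.1)
    PySem.List.sorted peak_months (fun x => x) false

-- ===== PORT B =====
def identify_peak_months_py_alt (monthly_patterns : List (Int × List (String × Int))) : List Int :=
  if monthly_patterns = [] then [6, 7, 8, 9, 10, 11]
  else
    -- teu = [monthly_patterns.get(m, {}).get('total_teu', 0) for m in range(1, 13)]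
    let teu := (PySem.List.pyRange 1 13).map (fun m => pvTeu monthly_patterns m)
    -- keep m iff rank(m) < 6, appending in ascending month order
    (PySem.List.pyRange 1 13).filter (fun m =>
      let t := PySem.List.pyGetD teu (m - 1) 0
      decide (((PySem.List.pyRange 1 13).countP (fun m2 =>
        let t2 := PySem.List.pyGetD teu (m2 - 1) 0
        decide (t2 > t ∨ (t2 = t ∧ m2 < m)))) < 6))

-- ===== PRECONDITION & SPEC =====
def Spec_identify_peak_months_py (monthly_patterns : List (Int × List (String × Int))) (out : List Int) : Prop := out = identify_peak_months_py_alt monthly_patterns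
instance (monthly_patterns : List (Int × List (String × Int))) (out : List Int) : Decidable (Spec_identify_peak_months_py monthly_patterns out) := by unfold Spec_identify_peak_months_py; infer_instance

-- ===== CLAIM (what is proved, stated in full; the proofs are below) =====
def Claim_equal_identify_peak_months_py : Prop := ∀ (monthly_patterns : List (Int × List (String × Int))), Dom_identify_peak_months_py monthly_patterns → Spec_identify_peak_months_py monthly_patterns (identify_peak_months_py monthly_patterns)

-- ===== LEMMAS AND PROOFS =====

-- the strict total order A's stable reverse sort realises on pairs with distinct months:
-- y before x iff y has higher TEU, or equal TEU and a smaller month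
def pvLTb (y x : Int × Int) : Bool := decide (x.2 < y.2 ∨ (y.2 = x.2 ∧ y.1 < x.1))

theorem pvLTb_irrefl (x : Int × Int) : pvLTb x x = false := by
  simp [pvLTb]

theorem pvLTb_asym {x y : Int × Int} (h : pvLTb y x = true) : pvLTb x y = false := by
  simp [pvLTb] at h ⊢; omega

theorem pvInsertBy_pairwise (x : Int × Int) (acc : List (Int × Int))
    (hb : ∀ y ∈ acc, y.1 < x.1)
    (hp : acc.Pairwise (fun a b => pvLTb a b = true)) :
    (PySem.List.insertBy (fun a b => decide (b.2 < a.2)) x acc).Pairwise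
      (fun a b => pvLTb a b = true) := by
  induction acc with
  | nil => simp [PySem.List.insertBy]
  | cons y ys ih =>
    rcases List.pairwise_cons.mp hp with ⟨hy, hys⟩
    by_cases hcmp : y.2 < x.2
    · simp only [PySem.List.insertBy, decide_eq_true_eq, if_pos hcmp]
      refine List.pairwise_cons.mpr ⟨?_, hp⟩
      intro z hz
      rcases List.mem_cons.mp hz with rfl | hz
      · simp [pvLTb]; omega
      · have := hy z hz
        simp [pvLTb] at this ⊢; omega
    · simp only [PySem.List.insertBy, decide_eq_true_eq, if_neg hcmp]
      refine List.pairwise_cons.mpr ⟨?_, ?_⟩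
      · intro z hz
        rcases (PySem.List.mem_insertBy _ x z ys).mp hz with rfl | hz
        · have hyx := hb y (by simp)
          simp [pvLTb]; omega
        · exact hy z hz
      · exact ih (fun w hw => hb w (by simp [hw])) hys

theorem pvFoldl_insertBy_pairwise (xs : List (Int × Int)) (acc : List (Int × Int))
    (hx : xs.Pairwise (fun a b => a.1 < b.1))
    (hb : ∀ y ∈ acc, ∀ x ∈ xs, y.1 < x.1)
    (hp : acc.Pairwise (fun a b => pvLTb a b = true)) :
    (xs.foldl (fun acc x => PySem.List.insertBy (fun a b => decide (b.2 < a.2)) x acc)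
        acc).Pairwise (fun a b => pvLTb a b = true) := by
  induction xs generalizing acc with
  | nil => simpa using hp
  | cons x xs ih =>
    rcases List.pairwise_cons.mp hx with ⟨hxh, hxt⟩
    simp only [List.foldl_cons]
    refine ih _ hxt ?_ ?_
    · intro y hy x' hx'
      rcases (PySem.List.mem_insertBy _ x y acc).mp hy with rfl | hy
      · exact hxh x' hx'
      · exact hb y hy x' (by simp [hx'])
    · exact pvInsertBy_pairwise x acc (fun y hy => hb y hy x (by simp)) hp

-- take n of a strictly pvLTb-sorted list = keep exactly the elements with rank < n
theorem pvTake_eq_filter_countP (S : List (Int × Int))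
    (hS : S.Pairwise (fun a b => pvLTb a b = true)) (n : Nat) :
    S.take n = S.filter (fun x => decide (S.countP (fun y => pvLTb y x) < n)) := by
  induction S generalizing n with
  | nil => simp
  | cons a T ih =>
    rcases List.pairwise_cons.mp hS with ⟨ha, hT⟩
    have hcnt_a : (a :: T).countP (fun y => pvLTb y a) = 0 := by
      rw [List.countP_eq_zero]
      intro y hy
      rcases List.mem_cons.mp hy with rfl | hy
      · simp [pvLTb_irrefl]
      · simp [pvLTb_asym (ha y hy)]
    have hcnt_t : ∀ x ∈ T, (a :: T).countP (fun y => pvLTb y x)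
        = T.countP (fun y => pvLTb y x) + 1 := by
      intro x hx
      simp [ha x hx]
    cases n with
    | zero =>
      simp only [List.take_zero]
      symm
      rw [List.filter_eq_nil_iff]
      intro x hx
      simp
    | succ m =>
      rw [List.take_succ_cons, List.filter_cons_of_pos (by simp [hcnt_a]),
        ih hT m]
      congr 1
      apply List.filter_congr
      intro x hx
      have := hcnt_t x hx
      simp only [this, decide_eq_decide]
      omega

-- evaluating B's list lookup: teu[m-1] = pvTeu mp m for 1 ≤ m < 13
theorem pvGetD_teu (mp : List (Int × List (String × Int))) (m : Int)
    (h1 : 1 ≤ m) (h2 : m < 13) :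
    PySem.List.pyGetD ((PySem.List.pyRange 1 13).map (fun k => pvTeu mp k)) (m - 1) 0
      = pvTeu mp m := by
  have hk : ((m - 1).toNat : Int) = m - 1 := Int.toNat_of_nonneg (by omega)
  have := PySem.List.pyGetD_map_pyRange_one (fun k => pvTeu mp k) 1 13 (m - 1).toNat 0
    (by omega)
  rw [hk] at this
  rw [this]
  congr 1
  omega

theorem pvMain (mp : List (Int × List (String × Int))) (h : mp ≠ []) :
    identify_peak_months_py mp = identify_peak_months_py_alt mp := by
  unfold identify_peak_months_py identify_peak_months_py_alt
  rw [if_neg h, if_neg h]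
  simp only [PySem.List.foldl_append_singleton_eq_map, List.nil_append,
    Nat.ofNat_nonneg, PySem.List.slice_to, Int.reduceToNat]
  set g : Int → Int × Int := fun m => (m, pvTeu mp m) with hg
  set L : List (Int × Int) := (PySem.List.pyRange 1 13).map g with hL
  set S : List (Int × Int) := PySem.List.sorted L (fun x => x.2) true with hS
  have hSperm : S.Perm L := PySem.List.sorted_perm L _ true
  -- S is pairwise sorted by the strict order pvLTb
  have hSpair : S.Pairwise (fun a b => pvLTb a b = true) := by
    rw [hS, PySem.List.sorted_rev_eq_foldl_insertBy]
    refine pvFoldl_insertBy_pairwise L [] ?_ (by simp) (by simp)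
    rw [hL]
    exact (PySem.List.pairwise_lt_pyRange_one 1 13).map g (fun a b hab => hab)
  -- rank predicate, counted over L
  set q : Int × Int → Bool := fun x => decide (L.countP (fun y => pvLTb y x) < 6) with hq
  have htake : S.take 6 = S.filter q := by
    rw [pvTake_eq_filter_countP S hSpair 6]
    apply List.filter_congr
    intro x _
    simp only [hq, decide_eq_decide]
    rw [hSperm.countP_eq]
  rw [htake]
  -- B's filter equals the range filtered by q ∘ g
  have hlook : ∀ m' ∈ PySem.List.pyRange 1 13,
      PySem.List.pyGetD ((PySem.List.pyRange 1 13).map (fun k => pvTeu mp k)) (m' - 1) 0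
        = pvTeu mp m' := by
    intro m' hm'
    have h' := (PySem.List.mem_pyRange_one).mp hm'
    exact pvGetD_teu mp m' h'.1 h'.2
  have hBeq :
      (PySem.List.pyRange 1 13).filter (fun m =>
        let t := PySem.List.pyGetD ((PySem.List.pyRange 1 13).map (fun k => pvTeu mp k)) (m - 1) 0
        decide (((PySem.List.pyRange 1 13).countP (fun m2 =>
          let t2 := PySem.List.pyGetD ((PySem.List.pyRange 1 13).map (fun k => pvTeu mp k)) (m2 - 1) 0
          decide (t2 > t ∨ (t2 = t ∧ m2 < m)))) < 6))
      = (PySem.List.pyRange 1 13).filter (fun m => q (g m)) := by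
    apply List.filter_congr
    intro m hm
    simp only [hlook m hm, hq, hL, List.countP_map, decide_eq_decide]
    have hcnt : ((PySem.List.pyRange 1 13).countP (fun m2 =>
        let t2 := PySem.List.pyGetD ((PySem.List.pyRange 1 13).map (fun k => pvTeu mp k)) (m2 - 1) 0
        decide (t2 > pvTeu mp m ∨ (t2 = pvTeu mp m ∧ m2 < m)))) =
        ((PySem.List.pyRange 1 13).countP ((fun y => pvLTb y (g m)) ∘ g)) := by
      apply List.countP_congr
      intro m2 hm2
      simp [hlook m2 hm2, Function.comp, pvLTb, hg]
    rw [hcnt]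
  rw [hBeq]
  -- both sides: the ascending list of peak months
  have h3 : (L.filter q).map (fun p => p.1) = (PySem.List.pyRange 1 13).filter (fun m => q (g m)) := by
    rw [hL, List.filter_map, List.map_map]
    have : ((fun p : Int × Int => p.1) ∘ g) = id := by funext m; rfl
    rw [this, List.map_id]
    rfl
  have hperm : ((PySem.List.pyRange 1 13).filter (fun m => q (g m))).Perm
      ((S.filter q).map (fun p => p.1)) := by
    rw [← h3]
    exact ((hSperm.filter q).map (fun p => p.1)).symm
  have hpair : ((PySem.List.pyRange 1 13).filter (fun m => q (g m))).Pairwise (· ≤ ·) :=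
    ((PySem.List.pairwise_lt_pyRange_one 1 13).filter _).imp le_of_lt
  exact PySem.List.sorted_id_eq_of_perm_of_pairwise _ _ hperm hpair

-- ===== VERDICT (by name: the statement is the Claim_ definition above) =====
theorem identify_peak_months_py_spec : Claim_equal_identify_peak_months_py := by
  intro mp _
  unfold Spec_identify_peak_months_py
  by_cases h : mp = []
  · subst h; rfl
  · exact pvMain mp h
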